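-- pv_equiv track=rewrite | github.com/ramblingjordan/code-wars-python | DecodeTheMorseCode-Advanced.py | transmissionRate
-- ===== SOURCE A (Python) =====
-- def transmissionRate(bits):
-- 	if len(bits) <= 2:
-- 		return len(bits)
-- 	if bits == '101':
-- 		return 1
--
-- 	for i in range(1,len(bits)-2):
-- 		check_code = '1' + i*'0' + '1'
-- 		if bits.find(check_code) > -1:
-- 			return i
-- 	return 1
-- ===== SOURCE B (Python) =====
-- def transmissionRate(bits):
--     n = len(bits)
--     if n <= 2:
--         return n
--     best = None
--     zeros = -1  # zeros counted since the last one-bit; -1 = no usable run yet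
--     for c in bits:
--         if c == '1':
--             if zeros >= 1 and (best is None or zeros < best):
--                 best = zeros
--             zeros = 0
--         elif c == '0':
--             if zeros >= 0:
--                 zeros += 1
--         else:
--             zeros = -1
--     return best if best is not None else 1
-- ===== Notes on version B (the rewrite author's own statement) =====
-- stated objective: faster
-- what changed: Replaced A's loop that builds each candidate gap pattern and runs a substring search for it (quadratic overall) by one left-to-right scan that counts the zeros between consecutive one-bits and keeps the minimum such gap.
-- intended difference: On strings that are exactly a one-bit, then k zeros (k >= 2), then a one-bit (e.g. '1001'), A's loop stops one pattern length short (range goes only to len-3) and falls through to return 1, while B returns the actual zero-gap k, which is the intended transmission rate. — e.g. on transmissionRate("1001"): A returns 1, B returns 2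
import Mathlib
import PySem

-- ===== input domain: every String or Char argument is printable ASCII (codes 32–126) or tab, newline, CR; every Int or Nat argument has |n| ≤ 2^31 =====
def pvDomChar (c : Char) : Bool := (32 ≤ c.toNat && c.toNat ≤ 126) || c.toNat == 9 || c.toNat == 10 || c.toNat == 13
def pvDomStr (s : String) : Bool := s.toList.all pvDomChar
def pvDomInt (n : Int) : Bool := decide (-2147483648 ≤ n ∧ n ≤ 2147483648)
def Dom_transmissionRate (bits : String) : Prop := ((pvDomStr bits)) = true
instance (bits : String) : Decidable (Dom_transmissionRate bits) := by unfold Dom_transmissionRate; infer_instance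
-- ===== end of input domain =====

-- B replaces A's per-candidate substring search by one scan keeping the minimal zero-gap between consecutive one-bits; on strings that are a one-bit, k zeros (k ≥ 2) and a one-bit, A returns 1 and B the intended k.

-- ===== PORT A =====
-- check_code = one-bit, i zero-bits, one-bit  (the loop only calls this with 1 ≤ i, where .toNat is exact)
def pvCode (i : Int) : List Char := '1' :: (List.replicate i.toNat '0' ++ ['1'])

-- the for-loop over range(1, len(bits)-2): return the first i whose pattern occurs, else 1
def pvALoop (s : List Char) : List Int → Int
  | [] => 1
  | i :: rest => if PySem.Chars.find s (pvCode i) > -1 then i else pvALoop s rest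

def transmissionRate (bits : String) : Int :=
  let l := bits.toList
  if (PySem.Chars.len l : Int) ≤ 2 then (PySem.Chars.len l : Int)
  else if l == ['1','0','1'] then 1  -- the string comparison of A, done on the code points
  else pvALoop l (PySem.List.pyRange 1 ((PySem.Chars.len l : Int) - 2) 1)

-- ===== PORT B =====
-- one scan step: state = (best gap found so far, zeros since the last one-bit, or -1)
def pvBStep (st : Option Int × Int) (c : Char) : Option Int × Int :=
  if c = '1' then
    (if 1 ≤ st.2 ∧ (∀ b ∈ st.1, st.2 < b) then some st.2 else st.1, 0)
  else if c = '0' then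
    (st.1, if 0 ≤ st.2 then st.2 + 1 else st.2)
  else (st.1, -1)

def transmissionRate_alt (bits : String) : Int :=
  let l := bits.toList
  if (PySem.Chars.len l : Int) ≤ 2 then (PySem.Chars.len l : Int)
  else
    match (l.foldl pvBStep (none, -1)).1 with
    | some b => b
    | none => 1

-- ===== PRECONDITION & SPEC =====
-- On strings of the exact shape '1' + k·'0' + '1' with k ≥ 2, A's range stops at len-3 so the
-- pattern of gap k is never tried and A falls through to 1; B returns the intended gap k.
def D_transmissionRate (bits : String) : Prop :=
  4 ≤ bits.toList.length ∧ bits.toList.head? = some '1' ∧ bits.toList.getLast? = some '1' ∧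
    ∀ c ∈ (bits.toList.drop 1).dropLast, c = '0'
instance (bits : String) : Decidable (D_transmissionRate bits) := by unfold D_transmissionRate; infer_instance

def Spec_transmissionRate (bits : String) (out : Int) : Prop := ¬ D_transmissionRate bits → out = transmissionRate_alt bits
instance (bits : String) (out : Int) : Decidable (Spec_transmissionRate bits out) := by unfold Spec_transmissionRate; infer_instance

def pvDiffWitness_transmissionRate : String := "1001"
def pvDiffWitnessOut_transmissionRate : Int × Int := (1, 2)

-- ===== CLAIM (what is proved, stated in full; the proofs are below) =====
def Claim_unchanged_transmissionRate : Prop := ∀ (bits : String), Dom_transmissionRate bits → Spec_transmissionRate bits (transmissionRate bits)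
def Claim_changed_transmissionRate : Prop := Dom_transmissionRate (pvDiffWitness_transmissionRate) ∧ D_transmissionRate (pvDiffWitness_transmissionRate) ∧ transmissionRate (pvDiffWitness_transmissionRate) = pvDiffWitnessOut_transmissionRate.1 ∧ transmissionRate_alt (pvDiffWitness_transmissionRate) = pvDiffWitnessOut_transmissionRate.2 ∧ pvDiffWitnessOut_transmissionRate.1 ≠ pvDiffWitnessOut_transmissionRate.2
def Claim_exact_transmissionRate : Prop := ∀ (bits : String), Dom_transmissionRate bits → D_transmissionRate bits → transmissionRate bits ≠ transmissionRate_alt bits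

-- ===== LEMMAS AND PROOFS =====

-- the pattern: a one-bit, g zero-bits, a one-bit
def pvPat (g : Nat) : List Char := '1' :: (List.replicate g '0' ++ ['1'])

theorem pvCode_natCast (g : Nat) : pvCode (g : Int) = pvPat g := by
  simp [pvCode, pvPat]

-- A's loop over range(lo, lo+len) returns the first (= least) gap in the window, else 1
theorem pvALoop_eq (s : List Char) (lo len : Nat) :
    pvALoop s (PySem.List.pyRange (lo : Int) ((lo + len : Nat) : Int) 1) =
      match (List.range' lo len).find? (fun g => PySem.Chars.isIn (pvPat g) s) with
      | some g => (g : Int)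
      | none => 1 := by
  induction len generalizing lo with
  | zero =>
    rw [PySem.List.pyRange_one_eq_nil (show ((lo + 0 : Nat) : Int) ≤ (lo : Int) by push_cast; omega)]; simp [pvALoop]
  | succ k ih =>
    rw [PySem.List.pyRange_one_cons (show (lo:Int) < ((lo + (k+1) : Nat) : Int) by push_cast; omega)]
    have h1 : ((lo : Int) + 1) = ((lo + 1 : Nat) : Int) := by push_cast; ring
    have h2 : ((lo + (k+1) : Nat) : Int) = (((lo + 1) + k : Nat) : Int) := by push_cast; ring
    rw [h2] at *
    simp only [pvALoop, pvCode_natCast, h1, ih (lo + 1)]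
    rw [List.range'_succ, List.find?_cons]
    by_cases h : PySem.Chars.isIn (pvPat lo) s = true
    · have : PySem.Chars.find s (pvPat lo) > -1 := by
        have := (PySem.Chars.find_nonneg_iff s (pvPat lo)).2 ((PySem.Chars.isIn_iff_infix _ _).1 h)
        omega
      simp [h, this]
    · have : ¬ PySem.Chars.find s (pvPat lo) > -1 := by
        have := (PySem.Chars.find_eq_neg_one_iff s (pvPat lo)).2
          (fun hc => h ((PySem.Chars.isIn_iff_infix _ _).2 hc))
        omega
      simp [h, this]

theorem pvALoop_eq_one (s : List Char) (len : Nat) :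
    pvALoop s (PySem.List.pyRange 1 ((1 + len : Nat) : Int) 1) =
      match (List.range' 1 len).find? (fun g => PySem.Chars.isIn (pvPat g) s) with
      | some g => (g : Int)
      | none => 1 := by
  have := pvALoop_eq s 1 len
  simpa using this

-- suffix cancel on the right
theorem pv_snoc_suffix {a b : List Char} {x y : Char} :
    a ++ [x] <:+ b ++ [y] ↔ x = y ∧ a <:+ b := by
  rw [← List.reverse_prefix]
  simp [List.cons_prefix_cons]

-- infix of l ++ [c] is an infix of l or a suffix of l ++ [c]
theorem pv_infix_concat {t l : List Char} {c : Char} :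
    t <:+: l ++ [c] ↔ t <:+: l ∨ t <:+ l ++ [c] := by
  rw [← List.reverse_infix, List.reverse_append]
  simp only [List.reverse_cons, List.reverse_nil, List.nil_append, List.singleton_append]
  rw [List.infix_cons_iff, ← List.reverse_infix]
  constructor
  · rintro (h | h)
    · right; rw [← List.reverse_prefix]; simpa [List.reverse_append] using h
    · left; simpa using h
  · rintro (h | h)
    · right; simpa using h
    · left; rw [← List.reverse_prefix] at h; simpa [List.reverse_append] using h

-- runs (a one-bit then k zero-bits) occurring as suffixes of the same list are unique
theorem pv_run_unique {p : List Char} {k k' : Nat}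
    (h : ('1' :: List.replicate k '0') <:+ p) (h' : ('1' :: List.replicate k' '0') <:+ p) : k = k' := by
  rcases List.suffix_or_suffix_of_suffix h h' with hs | hs
  · rcases (List.suffix_cons_iff).1 hs with he | hs
    · have := congrArg List.length he; simp at this; omega
    · exfalso
      have : '1' ∈ List.replicate k' '0' := hs.sublist.subset (by simp)
      simp at this
  · rcases (List.suffix_cons_iff).1 hs with he | hs
    · have := congrArg List.length he; simp at this; omega
    · exfalso
      have : '1' ∈ List.replicate k '0' := hs.sublist.subset (by simp)
      simp at this

-- how a run can end at the last character
theorem pv_run_concat (p : List Char) (k : Nat) (c : Char) :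
    ('1' :: List.replicate k '0') <:+ p ++ [c] ↔
      (k = 0 ∧ c = '1') ∨ (∃ j : Nat, k = j + 1 ∧ c = '0' ∧ ('1' :: List.replicate j '0') <:+ p) := by
  cases k with
  | zero =>
    constructor
    · intro h
      exact Or.inl ⟨rfl, ((pv_snoc_suffix (a := [])).1 h).1.symm⟩
    · rintro (⟨-, rfl⟩ | ⟨j, hj, -, -⟩)
      · exact (pv_snoc_suffix (a := [])).2 ⟨rfl, List.nil_suffix⟩
      · omega
  | succ j =>
    rw [List.replicate_succ']
    rw [show '1' :: (List.replicate j '0' ++ ['0']) = ('1' :: List.replicate j '0') ++ ['0'] from rfl]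
    rw [pv_snoc_suffix]
    constructor
    · rintro ⟨he, hs⟩
      exact Or.inr ⟨j, rfl, he.symm, hs⟩
    · rintro (⟨h0, -⟩ | ⟨j', hj', rfl, hs⟩)
      · omega
      · have : j' = j := by omega
        subst this
        exact ⟨rfl, hs⟩

-- how a gap pattern can occur in p ++ [c]
theorem pv_pat_concat (p : List Char) (g : Nat) (c : Char) :
    pvPat g <:+: p ++ [c] ↔ pvPat g <:+: p ∨ (c = '1' ∧ ('1' :: List.replicate g '0') <:+ p) := by
  rw [pv_infix_concat]
  have hsfx : pvPat g <:+ p ++ [c] ↔ '1' = c ∧ ('1' :: List.replicate g '0') <:+ p := by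
    rw [show pvPat g = ('1' :: List.replicate g '0') ++ ['1'] from rfl]
    exact pv_snoc_suffix
  rw [hsfx]
  constructor
  · rintro (h | ⟨he, hs⟩); exacts [Or.inl h, Or.inr ⟨he.symm, hs⟩]
  · rintro (h | ⟨he, hs⟩); exacts [Or.inl h, Or.inr ⟨he.symm, hs⟩]

-- the invariant carried by B's fold
def pvInv (p : List Char) (st : Option Int × Int) : Prop :=
  ((st.2 = -1 ∧ ∀ k : Nat, ¬ ('1' :: List.replicate k '0') <:+ p)
    ∨ (∃ k : Nat, st.2 = (k : Int) ∧ ('1' :: List.replicate k '0') <:+ p))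
  ∧ ((st.1 = none ∧ ∀ g : Nat, 1 ≤ g → ¬ pvPat g <:+: p)
    ∨ (∃ b : Nat, st.1 = some (b : Int) ∧ 1 ≤ b ∧ pvPat b <:+: p ∧
         ∀ g : Nat, 1 ≤ g → pvPat g <:+: p → b ≤ g))

theorem pvInv_step (p : List Char) (st : Option Int × Int) (c : Char)
    (h : pvInv p st) : pvInv (p ++ [c]) (pvBStep st c) := by
  obtain ⟨hz, hb⟩ := h
  by_cases hc1 : c = '1'
  · subst hc1
    unfold pvBStep
    rw [if_pos rfl]
    refine ⟨Or.inr ⟨0, rfl, (pv_snoc_suffix (a := [])).2 ⟨rfl, List.nil_suffix⟩⟩, ?_⟩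
    rcases hz with ⟨hz1, hnorun⟩ | ⟨k, hzk, hrun⟩
    · rw [if_neg (by rw [hz1]; simp)]
      rcases hb with ⟨hn, hng⟩ | ⟨b, hs, hb1, hgap, hmin⟩
      · exact Or.inl ⟨hn, fun g hg hcon => by
          rcases (pv_pat_concat p g '1').1 hcon with h | ⟨-, h⟩
          exacts [hng g hg h, hnorun g h]⟩
      · exact Or.inr ⟨b, hs, hb1, (pv_pat_concat p b '1').2 (Or.inl hgap), fun g hg hcon => by
          rcases (pv_pat_concat p g '1').1 hcon with h | ⟨-, h⟩
          exacts [hmin g hg h, absurd h (hnorun g)]⟩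
    · have gapiff2 : ∀ g : Nat, pvPat g <:+: p ++ ['1'] ↔ pvPat g <:+: p ∨ g = k := by
        intro g
        rw [pv_pat_concat]
        constructor
        · rintro (h | ⟨-, h⟩); exacts [Or.inl h, Or.inr (pv_run_unique h hrun)]
        · rintro (h | rfl); exacts [Or.inl h, Or.inr ⟨rfl, hrun⟩]
      by_cases hk1 : 1 ≤ k
      · rcases hb with ⟨hn, hng⟩ | ⟨b, hs, hb1, hgap, hmin⟩
        · rw [if_pos ⟨by rw [hzk]; exact_mod_cast hk1, by rw [hn]; simp⟩]
          refine Or.inr ⟨k, by rw [hzk], hk1, (gapiff2 k).2 (Or.inr rfl), ?_⟩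
          intro g hg hgap'
          rcases (gapiff2 g).1 hgap' with h | rfl
          · exact absurd h (hng g hg)
          · exact le_refl _
        · by_cases hkb : k < b
          · rw [if_pos ⟨by rw [hzk]; exact_mod_cast hk1, by
              rw [hs, hzk]; intro x hx; simp only [Option.mem_def, Option.some.injEq] at hx
              rw [← hx]; exact_mod_cast hkb⟩]
            refine Or.inr ⟨k, by rw [hzk], hk1, (gapiff2 k).2 (Or.inr rfl), ?_⟩
            intro g hg hgap'
            rcases (gapiff2 g).1 hgap' with h | rfl
            · exact le_trans (le_of_lt hkb) (hmin g hg h)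
            · exact le_refl _
          · rw [if_neg (by
              rintro ⟨-, hall⟩
              have := hall (b : Int) (by rw [hs]; rfl)
              rw [hzk] at this
              exact hkb (by exact_mod_cast this))]
            refine Or.inr ⟨b, hs, hb1, (gapiff2 b).2 (Or.inl hgap), ?_⟩
            intro g hg hgap'
            rcases (gapiff2 g).1 hgap' with h | rfl
            · exact hmin g hg h
            · omega
      · have hk0 : k = 0 := by omega
        subst hk0
        rw [if_neg (by rw [hzk]; simp)]
        rcases hb with ⟨hn, hng⟩ | ⟨b, hs, hb1, hgap, hmin⟩
        · exact Or.inl ⟨hn, fun g hg hcon => by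
            rcases (gapiff2 g).1 hcon with h | rfl
            exacts [hng g hg h, absurd hg (by omega)]⟩
        · exact Or.inr ⟨b, hs, hb1, (gapiff2 b).2 (Or.inl hgap), fun g hg hcon => by
            rcases (gapiff2 g).1 hcon with h | rfl
            exacts [hmin g hg h, absurd hg (by omega)]⟩
  · have hpat : ∀ g : Nat, pvPat g <:+: p ++ [c] ↔ pvPat g <:+: p := by
      intro g
      rw [pv_pat_concat]
      constructor
      · rintro (h | ⟨hc, -⟩); exacts [h, absurd hc hc1]
      · exact Or.inl
    have hbkeep : (st.1 = none ∧ ∀ g : Nat, 1 ≤ g → ¬ pvPat g <:+: p ++ [c])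
        ∨ (∃ b : Nat, st.1 = some (b : Int) ∧ 1 ≤ b ∧ pvPat b <:+: p ++ [c] ∧
             ∀ g : Nat, 1 ≤ g → pvPat g <:+: p ++ [c] → b ≤ g) := by
      rcases hb with ⟨hn, hng⟩ | ⟨b, hs, hb1, hgap, hmin⟩
      · exact Or.inl ⟨hn, fun g hg hcon => hng g hg ((hpat g).1 hcon)⟩
      · exact Or.inr ⟨b, hs, hb1, (hpat b).2 hgap, fun g hg hcon => hmin g hg ((hpat g).1 hcon)⟩
    by_cases hc0 : c = '0'
    · subst hc0
      unfold pvBStep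
      rw [if_neg (by decide), if_pos rfl]
      refine ⟨?_, hbkeep⟩
      rcases hz with ⟨hz1, hnorun⟩ | ⟨k, hzk, hrun⟩
      · rw [if_neg (by rw [hz1]; norm_num)]
        refine Or.inl ⟨hz1, ?_⟩
        intro k hk
        rcases (pv_run_concat p k '0').1 hk with ⟨-, h⟩ | ⟨j, -, -, hj⟩
        · exact absurd h (by decide)
        · exact hnorun j hj
      · rw [if_pos (by rw [hzk]; exact_mod_cast Nat.zero_le k)]
        refine Or.inr ⟨k + 1, by rw [hzk]; push_cast; ring, ?_⟩
        exact (pv_run_concat p (k+1) '0').2 (Or.inr ⟨k, rfl, rfl, hrun⟩)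
    · unfold pvBStep
      rw [if_neg hc1, if_neg hc0]
      refine ⟨Or.inl ⟨rfl, ?_⟩, hbkeep⟩
      intro k hk
      rcases (pv_run_concat p k c).1 hk with ⟨-, h⟩ | ⟨j, -, h, -⟩
      · exact hc1 h
      · exact hc0 h

theorem pvInv_foldl_aux (l : List Char) : ∀ p st, pvInv p st → pvInv (p ++ l) (l.foldl pvBStep st) := by
  induction l with
  | nil => intro p st h; simpa using h
  | cons c l ih =>
    intro p st h
    have := ih (p ++ [c]) (pvBStep st c) (pvInv_step p st c h)
    simpa [List.foldl_cons, List.append_assoc] using this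

theorem pvInv_foldl (l : List Char) : pvInv l (l.foldl pvBStep (none, -1)) := by
  have h0 : pvInv [] ((none : Option Int), (-1 : Int)) := by
    refine ⟨Or.inl ⟨rfl, ?_⟩, Or.inl ⟨rfl, ?_⟩⟩
    · intro k hk
      have := hk.length_le; simp at this
    · intro g hg hc
      have := hc.length_le; simp [pvPat] at this
  simpa using pvInv_foldl_aux l [] _ h0

-- a gap's pattern fits in the string, and fills it only if the string IS the pattern
theorem pv_gap_le {l : List Char} {g : Nat} (h : pvPat g <:+: l) : g + 2 ≤ l.length := by
  have := h.length_le; simpa [pvPat] using this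

theorem pv_gap_eq {l : List Char} {g : Nat} (h : pvPat g <:+: l) (hl : l.length = g + 2) :
    l = pvPat g := by
  refine (h.sublist.eq_of_length ?_).symm
  simp [pvPat, hl]

-- find? on range' finds a known least witness
theorem pv_find?_range' (p : Nat → Bool) (lo len b : Nat) (hb : p b = true)
    (hlo : lo ≤ b) (hlt : b < lo + len) (hmin : ∀ g, lo ≤ g → g < b → p g = false) :
    (List.range' lo len).find? p = some b := by
  induction len generalizing lo with
  | zero => omega
  | succ k ih =>
    rw [List.range'_succ, List.find?_cons]
    by_cases hp : p lo = true
    · have : lo = b := by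
        by_contra hne
        have := hmin lo (le_refl lo) (by omega)
        rw [this] at hp; exact absurd hp (by simp)
      subst this; simp [hb]
    · have hne : lo ≠ b := fun he => by rw [he, hb] at hp; exact absurd rfl hp
      simp only [Bool.not_eq_true] at hp
      simp only [hp]
      exact ih (lo + 1) (by omega) (by omega) (fun g h1 h2 => hmin g (by omega) h2)

-- D characterizes exactly the strings pvPat k, k ≥ 2
theorem pvD_iff (bits : String) :
    D_transmissionRate bits ↔ ∃ k : Nat, 2 ≤ k ∧ bits.toList = pvPat k := by
  unfold D_transmissionRate
  generalize bits.toList = l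
  constructor
  · rintro ⟨hlen, hhead, hlast, hmid⟩
    cases l with
    | nil => simp at hhead
    | cons x l' =>
      have hx : x = '1' := by simpa using hhead
      subst hx
      have hl' : l' ≠ [] := by intro h; subst h; simp at hlen
      have hlast' : l'.getLast? = some '1' := by
        rw [List.getLast?_cons] at hlast
        cases hgl : l'.getLast? with
        | none => exact absurd (List.getLast?_eq_none_iff.1 hgl) hl'
        | some a => rw [hgl] at hlast; simp at hlast; rw [hlast]
      have hdec : l' = l'.dropLast ++ [l'.getLast hl'] := (List.dropLast_append_getLast hl').symm
      have hg : l'.getLast hl' = '1' := by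
        have h2 := List.getLast?_eq_some_getLast (l := l') hl'
        rw [h2] at hlast'; simpa using hlast'
      have hrep : l'.dropLast = List.replicate l'.dropLast.length '0' := by
        apply List.eq_replicate_of_mem
        intro c hc; exact hmid c (by simpa using hc)
      have hll : l'.length = l'.dropLast.length + 1 := by
        conv_lhs => rw [hdec]
        simp
      refine ⟨l'.dropLast.length, ?_, ?_⟩
      · simp at hlen; omega
      · simp only [pvPat]
        congr 1
        rw [← hrep]
        conv_lhs => rw [hdec]
        rw [hg]
  · rintro ⟨k, hk, rfl⟩
    refine ⟨by simp [pvPat]; omega, by simp [pvPat], ?_, ?_⟩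
    · show (('1' :: List.replicate k '0') ++ ['1']).getLast? = some '1'
      exact List.getLast?_concat
    · intro c hc
      simp only [pvPat, List.drop_succ_cons, List.drop_zero] at hc
      rw [List.dropLast_concat] at hc
      simpa using (List.eq_of_mem_replicate hc)

theorem pvPat_getElem_last (g : Nat) : (pvPat g)[g+1]? = some '1' := by simp [pvPat]

theorem pvPat_getElem_mid (k j : Nat) (hjk : j < k) : (pvPat k)[j+1]? = some '0' := by
  simp only [pvPat, List.getElem?_cons_succ]
  rw [List.getElem?_append_left (by simpa using hjk)]
  simp [hjk]

-- no shorter pattern occurs inside pvPat k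
theorem pv_noGap {g k : Nat} (hg : 1 ≤ g) (hlt : g < k) : ¬ pvPat g <:+: pvPat k := by
  rintro ⟨s, t, hst⟩
  cases s with
  | nil =>
    have hidx : (([] : List Char) ++ pvPat g ++ t)[g+1]? = some '1' := by
      simp only [List.nil_append]
      rw [List.getElem?_append_left (by simp [pvPat])]
      exact pvPat_getElem_last g
    rw [hst, pvPat_getElem_mid k g hlt] at hidx
    simp at hidx
  | cons a s' =>
    have h := congrArg List.length hst
    simp [pvPat] at h
    have hidx : ((a :: s') ++ pvPat g ++ t)[s'.length + 1]? = some '1' := by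
      rw [List.getElem?_append_left (by simp [pvPat])]
      rw [List.getElem?_append_right (by simp)]
      simp [pvPat]
    rw [hst, pvPat_getElem_mid k s'.length (by omega)] at hidx
    simp at hidx

-- ===== VERDICT (by name: the statement is the Claim_ definition above) =====
theorem transmissionRate_spec : Claim_unchanged_transmissionRate := by
  unfold Claim_unchanged_transmissionRate
  intro bits _ hnd
  by_cases h2 : (PySem.Chars.len bits.toList : Int) ≤ 2
  · simp only [transmissionRate, transmissionRate_alt, if_pos h2]
  · by_cases h101 : bits.toList = ['1','0','1']
    · simp only [transmissionRate, transmissionRate_alt, if_neg h2]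
      rw [if_pos (by simp [h101]), h101]
      rfl
    · have hn3 : 3 ≤ bits.toList.length := by
        simp only [PySem.Chars.len_eq] at h2; omega
      simp only [transmissionRate, transmissionRate_alt, if_neg h2]
      rw [if_neg (by simp [h101])]
      have hr : ((PySem.Chars.len bits.toList : Int) - 2) = ((1 + (bits.toList.length - 3) : Nat) : Int) := by
        simp only [PySem.Chars.len_eq]; push_cast; omega
      rw [hr, pvALoop_eq_one]
      obtain ⟨hz, hbst⟩ := pvInv_foldl bits.toList
      rcases hbst with ⟨hnone, hng⟩ | ⟨b, hsome, hb1, hbgap, hbmin⟩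
      · rw [hnone]
        have hfn : (List.range' 1 (bits.toList.length - 3)).find?
            (fun g => PySem.Chars.isIn (pvPat g) bits.toList) = none := by
          rw [List.find?_eq_none]
          intro g hgmem
          have hg1 : 1 ≤ g := (List.mem_range'_1.1 hgmem).1
          simp only [Bool.not_eq_true, PySem.Chars.isIn_eq_false_iff]
          exact hng g hg1
        rw [hfn]
      · rw [hsome]
        have hble : b + 2 ≤ bits.toList.length := pv_gap_le hbgap
        have hblt : b + 2 < bits.toList.length := by
          rcases lt_or_eq_of_le hble with h | h
          · exact h
          · exfalso
            have heq := pv_gap_eq hbgap h.symm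
            rcases Nat.lt_or_ge b 2 with hb2 | hb2
            · have hbe : b = 1 := by omega
              subst hbe
              exact h101 (by rw [heq]; rfl)
            · exact hnd ((pvD_iff bits).2 ⟨b, hb2, heq⟩)
        have hfind : (List.range' 1 (bits.toList.length - 3)).find?
            (fun g => PySem.Chars.isIn (pvPat g) bits.toList) = some b := by
          apply pv_find?_range' _ 1 _ b
          · exact (PySem.Chars.isIn_iff_infix _ _).2 hbgap
          · exact hb1
          · omega
          · intro g hg1 hgb
            simp only [PySem.Chars.isIn_eq_false_iff]
            intro hcon
            exact absurd (hbmin g hg1 hcon) (by omega)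
        rw [hfind]

theorem transmissionRate_changed : Claim_changed_transmissionRate := by
  unfold Claim_changed_transmissionRate
  refine ⟨by decide, ?_, by decide, by decide, by decide⟩
  unfold D_transmissionRate pvDiffWitness_transmissionRate
  exact ⟨by decide, by decide, by decide, by simp⟩

theorem transmissionRate_tight : Claim_exact_transmissionRate := by
  unfold Claim_exact_transmissionRate
  intro bits _ hd
  obtain ⟨k, hk2, hl⟩ := (pvD_iff bits).1 hd
  have hlen : bits.toList.length = k + 2 := by rw [hl]; simp [pvPat]
  have h2 : ¬ (PySem.Chars.len bits.toList : Int) ≤ 2 := by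
    simp only [PySem.Chars.len_eq, hlen]; push_cast; omega
  have h101 : bits.toList ≠ ['1','0','1'] := by
    rw [hl]; intro he
    have := congrArg List.length he
    simp [pvPat] at this; omega
  simp only [transmissionRate, transmissionRate_alt, if_neg h2]
  rw [if_neg (by simp [h101])]
  have hr : ((PySem.Chars.len bits.toList : Int) - 2) = ((1 + (bits.toList.length - 3) : Nat) : Int) := by
    simp only [PySem.Chars.len_eq]; push_cast; omega
  rw [hr, pvALoop_eq_one]
  have hfn : (List.range' 1 (bits.toList.length - 3)).find?
      (fun g => PySem.Chars.isIn (pvPat g) bits.toList) = none := by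
    rw [List.find?_eq_none]
    intro g hgmem
    have hg := List.mem_range'_1.1 hgmem
    simp only [Bool.not_eq_true, PySem.Chars.isIn_eq_false_iff]
    rw [hl]
    exact pv_noGap hg.1 (by omega)
  rw [hfn]
  obtain ⟨hz, hbst⟩ := pvInv_foldl bits.toList
  rcases hbst with ⟨hnone, hng⟩ | ⟨b, hsome, hb1, hbgap, hbmin⟩
  · exact absurd (show pvPat k <:+: bits.toList by rw [hl]) (hng k (by omega))
  · rw [hsome]
    have hbk : b = k := by
      have hle : b ≤ k := hbmin k (by omega) (show pvPat k <:+: bits.toList by rw [hl])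
      rcases Nat.lt_or_ge b k with hlt | hge
      · exfalso
        rw [hl] at hbgap
        exact pv_noGap hb1 hlt hbgap
      · omega
    subst hbk
    intro hcon
    have : (1 : Int) = (b : Int) := hcon
    omega
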